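-- pv_equiv track=rewrite | github.com/benlawraus/anvilDocs2classes | src/anvilDocs2classes/functions.py | translate_type
-- ===== SOURCE A (Python) =====
-- from typing import Tuple, List, Dict
--
-- def translate_type(attr_method, type_catalog: Dict[str, str], module_name: str) -> str:
--     seconds_list = ('duration', 'current_time', 'interval')
--     objects_list = ('items',)
--     int_list = ('rows_per_page',)
--     attr, of_type, description, _ = list(attr_method.values())
--
--     if 'list' in of_type:
--         attr_method['of_type'] = of_type.replace('list(', '').replace(')', '')
--         of_type = translate_type(attr_method, type_catalog, module_name)
--         return 'List[' + of_type + ']'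
--     if attr in seconds_list:
--         return 'Seconds'
--     if attr in objects_list:
--         return 'Items'
--     if attr in int_list:
--         return 'Integer'
--     if attr == 'parent':
--         return 'Object'
--     if 'anvil' in of_type and of_type.count('.') == 1:
--         class_name = of_type.replace(' instance', '')
--         if module_name == 'anvil':
--             # drop the `anvil.`
--             class_name = class_name.replace('anvil.', '')
--         type_catalog.update({class_name: class_name})
--         return class_name
--     if module_name in of_type:
--         class_name = of_type.replace(' instance', '').split(module_name + '.')[1]
--         type_catalog.update({class_name: class_name})
--         return class_name
--     if "in pixels" in description:
--         return 'Pixels'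
--     if of_type == '':
--         return 'String'
--     if of_type.count('.') > 1:  # not sure what this is
--         return 'Object'
--     return of_type.capitalize()
-- ===== SOURCE B (Python) =====
-- _SPECIAL = {'duration': 'Seconds', 'current_time': 'Seconds', 'interval': 'Seconds',
--             'items': 'Items', 'rows_per_page': 'Integer', 'parent': 'Object'}
--
--
-- def translate_type(attr_method, type_catalog, module_name):
--     attr, of_type, description, _ = attr_method.values()
--     if 'list' in of_type:
--         of_type = of_type.replace('list(', '').replace(')', '')
--         attr_method['of_type'] = of_type
--         return 'List[' + _core_name(attr, of_type, description, type_catalog, module_name) + ']'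
--     return _core_name(attr, of_type, description, type_catalog, module_name)
--
--
-- def _core_name(attr, of_type, description, type_catalog, module_name):
--     if attr in _SPECIAL:
--         return _SPECIAL[attr]
--     if 'anvil' in of_type and of_type.count('.') == 1:
--         class_name = of_type.replace(' instance', '')
--         if module_name == 'anvil':
--             class_name = class_name.replace('anvil.', '')
--         type_catalog[class_name] = class_name
--         return class_name
--     if module_name in of_type:
--         class_name = of_type.replace(' instance', '').split(module_name + '.')[1]
--         type_catalog[class_name] = class_name
--         return class_name
--     if 'in pixels' in description:
--         return 'Pixels'
--     if of_type == '':
--         return 'String'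
--     if of_type.count('.') > 1:
--         return 'Object'
--     return of_type.capitalize()
-- ===== Notes on version B (the rewrite author's own statement) =====
-- stated objective: simpler
-- what changed: B replaces A's self-recursion through the mutated dict for list(...) types by a single strip-then-wrap pass, and replaces the four attr-specific conditionals by one lookup table; the remaining string cascade lives in a helper called once.
import Mathlib
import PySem

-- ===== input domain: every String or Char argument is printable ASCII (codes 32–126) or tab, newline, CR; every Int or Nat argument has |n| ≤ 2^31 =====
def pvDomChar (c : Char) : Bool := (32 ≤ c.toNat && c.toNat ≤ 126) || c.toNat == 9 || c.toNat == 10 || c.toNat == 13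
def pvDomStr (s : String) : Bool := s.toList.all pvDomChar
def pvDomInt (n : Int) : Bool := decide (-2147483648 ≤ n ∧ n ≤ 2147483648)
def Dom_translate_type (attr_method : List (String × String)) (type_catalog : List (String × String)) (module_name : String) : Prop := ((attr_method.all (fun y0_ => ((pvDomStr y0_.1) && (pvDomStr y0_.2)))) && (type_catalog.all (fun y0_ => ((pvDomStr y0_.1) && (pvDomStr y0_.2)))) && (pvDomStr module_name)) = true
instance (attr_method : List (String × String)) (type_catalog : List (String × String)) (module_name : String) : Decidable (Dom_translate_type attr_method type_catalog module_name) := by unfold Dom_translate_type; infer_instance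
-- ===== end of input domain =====

-- B replaces A's self-recursive list(...) handling by a single strip-then-wrap pass and the four
-- attr-specific conditionals by a lookup table (objective: simpler). Equivalence is about the RETURN
-- value only: both Pythons mutate attr_method['of_type'] and type_catalog identically on Pre_, but the
-- Lean ports model neither mutation (the result string does not depend on them).

-- ===== PORT A =====
-- str.capitalize(): uppercase the first character, lowercase the rest — exact on the ASCII domain
def pyCapitalize (s : String) : String :=
  match s.toList with
  | [] => ""
  | c :: rest => String.ofList (PySem.Chars.upper [c] ++ PySem.Chars.lower rest)

-- A's cascade of conditionals after the 'list' guard, extracted verbatim as a helper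
def ttCascade (attr of_type description module_name : String) : String :=
  if attr == "duration" || attr == "current_time" || attr == "interval" then "Seconds"
  else if attr == "items" then "Items"
  else if attr == "rows_per_page" then "Integer"
  else if attr == "parent" then "Object"
  else if PySem.Str.isIn "anvil" of_type && PySem.Str.count of_type "." == 1 then
    (if module_name == "anvil" then PySem.Str.replace (PySem.Str.replace of_type " instance" "") "anvil." ""
     else PySem.Str.replace of_type " instance" "")
  else if PySem.Str.isIn module_name of_type then
    -- split(module_name + '.')[1]; the [1] raises IndexError when absent — excluded by Pre_
    (((PySem.Str.split? (PySem.Str.replace of_type " instance" "") (module_name ++ ".")).getD [])[1]?).getD ""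
  else if PySem.Str.isIn "in pixels" description then "Pixels"
  else if of_type == "" then "String"
  else if PySem.Str.count of_type "." > 1 then "Object"
  else pyCapitalize of_type

-- the recursion of A, with fuel (A recurses on the stripped 'of_type'; under Pre_ at most one
-- recursive call happens, and the fuel below is ≥ 2, so fuel exhaustion is unreachable there)
def ttGoA (fuel : Nat) (d : PySem.Dict String String) (module_name : String) : String :=
  match fuel with
  | 0 => ""  -- fuel exhausted (unreachable under Pre_)
  | n + 1 =>
    match d.values with
    | [attr, of_type, description, _] =>
      if PySem.Str.isIn "list" of_type then
        "List[" ++ ttGoA n (d.insert "of_type" (PySem.Str.replace (PySem.Str.replace of_type "list(" "") ")" "")) module_name ++ "]"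
      else ttCascade attr of_type description module_name
    | _ => ""  -- list(attr_method.values()) does not unpack into 4 names: ValueError, excluded by Pre_

def translate_type (attr_method : List (String × String)) (type_catalog : List (String × String)) (module_name : String) : String :=
  ttGoA ((attr_method.map (fun p => p.2.length)).sum + 2) (PySem.Dict.mk attr_method) module_name

-- ===== PORT B =====
def ttSpecial : PySem.Dict String String :=
  PySem.Dict.mk [("duration", "Seconds"), ("current_time", "Seconds"), ("interval", "Seconds"),
                 ("items", "Items"), ("rows_per_page", "Integer"), ("parent", "Object")]

def ttCore (attr of_type description module_name : String) : String :=
  match ttSpecial.get? attr with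
  | some t => t
  | none =>
    if PySem.Str.isIn "anvil" of_type && PySem.Str.count of_type "." == 1 then
      let class_name := PySem.Str.replace of_type " instance" ""
      if module_name == "anvil" then PySem.Str.replace class_name "anvil." "" else class_name
    else if PySem.Str.isIn module_name of_type then
      (((PySem.Str.split? (PySem.Str.replace of_type " instance" "") (module_name ++ ".")).getD [])[1]?).getD ""
    else if PySem.Str.isIn "in pixels" description then "Pixels"
    else if of_type == "" then "String"
    else if PySem.Str.count of_type "." > 1 then "Object"
    else pyCapitalize of_type

def translate_type_alt (attr_method : List (String × String)) (type_catalog : List (String × String)) (module_name : String) : String :=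
  match (PySem.Dict.mk attr_method).values with
  | [attr, of_type, description, _] =>
    if PySem.Str.isIn "list" of_type then
      "List[" ++ ttCore attr (PySem.Str.replace (PySem.Str.replace of_type "list(" "") ")" "") description module_name ++ "]"
    else ttCore attr of_type description module_name
  | _ => ""

-- ===== PRECONDITION & SPEC =====
-- one application of the strip A performs on a list(...) type, and the of_type string the cascade ends up running on
def ttStrip (v : String) : String := PySem.Str.replace (PySem.Str.replace v "list(" "") ")" ""
def ttEff (v : String) : String := if PySem.Str.isIn "list" v then ttStrip v else v

-- Pre_ excludes: dicts without exactly four (distinct-key) entries — A's unpacking raises ValueError,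
-- and duplicate keys cannot arise from a Python dict; list-typed 'of_type' values whose second key is
-- not 'of_type' or whose single strip still contains 'list' — there A recurses forever, raises, or (in
-- rare crafted cases) returns an accidental nested 'List[List[...]]' wrap; and inputs where the
-- module-name split has no second part — A raises IndexError.
def Pre_translate_type (attr_method : List (String × String)) (type_catalog : List (String × String)) (module_name : String) : Prop :=
  attr_method.length = 4 ∧ (attr_method.map Prod.fst).Nodup ∧
  (PySem.Str.isIn "list" (((attr_method.map Prod.snd)[1]?).getD "") = true →
    ((attr_method.map Prod.fst)[1]?).getD "" = "of_type" ∧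
    PySem.Str.isIn "list" (ttStrip (((attr_method.map Prod.snd)[1]?).getD "")) = false) ∧
  ((((attr_method.map Prod.snd)[0]?).getD "" ∉ ["duration", "current_time", "interval", "items", "rows_per_page", "parent"] ∧
    ¬(PySem.Str.isIn "anvil" (ttEff (((attr_method.map Prod.snd)[1]?).getD "")) = true ∧
      PySem.Str.count (ttEff (((attr_method.map Prod.snd)[1]?).getD "")) "." = 1) ∧
    PySem.Str.isIn module_name (ttEff (((attr_method.map Prod.snd)[1]?).getD "")) = true) →
   2 ≤ ((PySem.Str.split? (PySem.Str.replace (ttEff (((attr_method.map Prod.snd)[1]?).getD "")) " instance" "") (module_name ++ ".")).getD []).length)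

instance (attr_method : List (String × String)) (type_catalog : List (String × String)) (module_name : String) : Decidable (Pre_translate_type attr_method type_catalog module_name) := by unfold Pre_translate_type; infer_instance

def pvWitness_translate_type : (List (String × String)) × (List (String × String)) × String :=
  ([("attr", "x"), ("of_type", "text"), ("description", "d"), ("group", "g")], [], "mod")

def Spec_translate_type (attr_method : List (String × String)) (type_catalog : List (String × String)) (module_name : String) (out : String) : Prop := out = translate_type_alt attr_method type_catalog module_name
instance (attr_method : List (String × String)) (type_catalog : List (String × String)) (module_name : String) (out : String) : Decidable (Spec_translate_type attr_method type_catalog module_name out) := by unfold Spec_translate_type; infer_instance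

-- ===== CLAIM (what is proved, stated in full; the proofs are below) =====
def Claim_equal_translate_type : Prop := ∀ (attr_method : List (String × String)) (type_catalog : List (String × String)) (module_name : String), Dom_translate_type attr_method type_catalog module_name → Pre_translate_type attr_method type_catalog module_name → Spec_translate_type attr_method type_catalog module_name (translate_type attr_method type_catalog module_name)

-- ===== LEMMAS AND PROOFS =====

-- one unfolding step of A's recursion on a four-entry dict
theorem ttGoA_step (n : Nat) (k0 v0 k1 v1 k2 v2 k3 v3 module_name : String) :
    ttGoA (Nat.succ n) (PySem.Dict.mk [(k0, v0), (k1, v1), (k2, v2), (k3, v3)]) module_name =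
      if PySem.Str.isIn "list" v1 then
        "List[" ++ ttGoA n ((PySem.Dict.mk [(k0, v0), (k1, v1), (k2, v2), (k3, v3)]).insert "of_type"
          (PySem.Str.replace (PySem.Str.replace v1 "list(" "") ")" "")) module_name ++ "]"
      else ttCascade v0 v1 v2 module_name := rfl

-- B's port on a four-entry dict
theorem alt_step (k0 v0 k1 v1 k2 v2 k3 v3 : String) (tc : List (String × String)) (mn : String) :
    translate_type_alt [(k0, v0), (k1, v1), (k2, v2), (k3, v3)] tc mn =
      if PySem.Str.isIn "list" v1 then
        "List[" ++ ttCore v0 (PySem.Str.replace (PySem.Str.replace v1 "list(" "") ")" "") v2 mn ++ "]"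
      else ttCore v0 v1 v2 mn := rfl

-- A's cascade computes exactly B's ttCore
theorem cascade_eq_ttCore (attr of_type description module_name : String) :
    ttCascade attr of_type description module_name = ttCore attr of_type description module_name := by
  by_cases h1 : attr = "duration"
  · subst h1; rfl
  by_cases h2 : attr = "current_time"
  · subst h2; rfl
  by_cases h3 : attr = "interval"
  · subst h3; rfl
  by_cases h4 : attr = "items"
  · subst h4; rfl
  by_cases h5 : attr = "rows_per_page"
  · subst h5; rfl
  by_cases h6 : attr = "parent"
  · subst h6; rfl
  have e1 : (attr == "duration") = false := beq_eq_false_iff_ne.mpr h1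
  have e2 : (attr == "current_time") = false := beq_eq_false_iff_ne.mpr h2
  have e3 : (attr == "interval") = false := beq_eq_false_iff_ne.mpr h3
  have e4 : (attr == "items") = false := beq_eq_false_iff_ne.mpr h4
  have e5 : (attr == "rows_per_page") = false := beq_eq_false_iff_ne.mpr h5
  have e6 : (attr == "parent") = false := beq_eq_false_iff_ne.mpr h6
  have f1 : ("duration" == attr) = false := beq_eq_false_iff_ne.mpr (Ne.symm h1)
  have f2 : ("current_time" == attr) = false := beq_eq_false_iff_ne.mpr (Ne.symm h2)
  have f3 : ("interval" == attr) = false := beq_eq_false_iff_ne.mpr (Ne.symm h3)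
  have f4 : ("items" == attr) = false := beq_eq_false_iff_ne.mpr (Ne.symm h4)
  have f5 : ("rows_per_page" == attr) = false := beq_eq_false_iff_ne.mpr (Ne.symm h5)
  have f6 : ("parent" == attr) = false := beq_eq_false_iff_ne.mpr (Ne.symm h6)
  unfold ttCascade ttCore ttSpecial
  simp only [PySem.Dict.get?, List.find?, e1, e2, e3, e4, e5, e6, f1, f2, f3, f4, f5, f6,
    Bool.or_false, Option.map_none, if_false, Bool.false_eq_true]

-- overwriting the 'of_type' entry of a four-entry dict whose other keys differ from it
theorem insert_oftype (k0 v0 v1 k2 v2 k3 v3 s : String)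
    (h0 : k0 ≠ "of_type") (h2 : k2 ≠ "of_type") (h3 : k3 ≠ "of_type") :
    (PySem.Dict.mk [(k0, v0), ("of_type", v1), (k2, v2), (k3, v3)]).insert "of_type" s =
      PySem.Dict.mk [(k0, v0), ("of_type", s), (k2, v2), (k3, v3)] := by
  simp [PySem.Dict.insert, PySem.Dict.contains, h0, h2, h3]

-- ===== VERDICT (by name: the statement is the Claim_ definition above) =====
set_option maxHeartbeats 1000000 in
theorem translate_type_spec : Claim_equal_translate_type := by
  intro am tc mn _hDom hPre
  unfold Spec_translate_type
  obtain ⟨hlen, hnd, hlist, _hsplit⟩ := hPre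
  rcases am with _ | ⟨⟨k0, v0⟩, _ | ⟨⟨k1, v1⟩, _ | ⟨⟨k2, v2⟩, _ | ⟨⟨k3, v3⟩, rest⟩⟩⟩⟩ <;>
    simp only [List.length_cons, List.length_nil] at hlen <;> try omega
  have hrest : rest = [] := by
    cases rest with
    | nil => rfl
    | cons a t => simp at hlen
  subst hrest
  simp only [List.map_cons, List.map_nil, List.getElem?_cons_zero, List.getElem?_cons_succ,
    Option.getD_some] at hlist
  have hfuel : translate_type [(k0, v0), (k1, v1), (k2, v2), (k3, v3)] tc mn
      = ttGoA (Nat.succ (Nat.succ ((List.map (fun p => p.2.length) [(k0, v0), (k1, v1), (k2, v2), (k3, v3)]).sum)))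
          (PySem.Dict.mk [(k0, v0), (k1, v1), (k2, v2), (k3, v3)]) mn := rfl
  rw [hfuel, alt_step, ttGoA_step]
  by_cases hW : PySem.Str.isIn "list" v1 = true
  · -- wrapped: A recurses once on the stripped of_type, B strips and wraps
    obtain ⟨hk1, hs⟩ := hlist hW
    subst hk1
    simp only [List.map_cons, List.map_nil, List.nodup_cons, List.mem_cons, 
      List.not_mem_nil, not_or, or_false] at hnd
    rw [if_pos hW, if_pos hW,
      insert_oftype k0 v0 v1 k2 v2 k3 v3 _ hnd.1.1 (Ne.symm hnd.2.1.1) (Ne.symm hnd.2.1.2),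
      ttGoA_step, if_neg (by simp [ttStrip] at hs; simp [hs]), cascade_eq_ttCore]
  · -- not wrapped: both run the cascade on of_type as given
    rw [if_neg hW, if_neg hW, cascade_eq_ttCore]
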